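-- pv_equiv track=rewrite | github.com/jvuori/spot-planner | tests/visualization_scenarios_test.py | validate_constraints
-- ===== SOURCE A (Python) =====
-- def validate_constraints(
--     selected: list[int],
--     total_length: int,
--     min_selections: int,
--     min_consecutive_periods: int,
--     max_gap_between_periods: int,
--     max_gap_from_start: int,
-- ) -> tuple[bool, list[str]]:
--     """
--     Validate that a selection meets all constraints.
--
--     Returns:
--         (is_valid, violations) - tuple of bool and list of violation messages
--     """
--     violations = []
--
--     if not selected:
--         violations.append("Selection is empty")
--         return False, violations
--
--     indices = sorted(selected)
--
--     # Check minimum selections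
--     if len(indices) < min_selections:
--         violations.append(
--             f"Not enough selections: {len(indices)} < {min_selections}"
--         )
--
--     # Check max_gap_from_start
--     if indices[0] > max_gap_from_start:
--         violations.append(
--             f"Gap from start too large: {indices[0]} > {max_gap_from_start}"
--         )
--
--     # Check gap at end
--     end_gap = total_length - 1 - indices[-1]
--     if end_gap > max_gap_between_periods:
--         violations.append(
--             f"Gap at end too large: {end_gap} > {max_gap_between_periods}"
--         )
--
--     # Check consecutive runs and gaps
--     runs = []
--     run_start = indices[0]
--     for i in range(1, len(indices)):
--         if indices[i] != indices[i - 1] + 1: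
--             # End of run
--             runs.append((run_start, indices[i - 1]))
--
--             # Check gap
--             gap = indices[i] - indices[i - 1] - 1
--             if gap > max_gap_between_periods:
--                 violations.append(
--                     f"Gap too large between indices {indices[i-1]} and {indices[i]}: "
--                     f"{gap} > {max_gap_between_periods}"
--                 )
--
--             run_start = indices[i]
--     runs.append((run_start, indices[-1]))
--
--     # Check consecutive run lengths
--     for start, end in runs:
--         length = end - start + 1
--         if length < min_consecutive_periods:
--             violations.append(
--                 f"Consecutive run [{start}-{end}] too short: "
--                 f"length={length} < {min_consecutive_periods}"
--             )
--
--     return len(violations) == 0, violations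
-- ===== SOURCE B (Python) =====
-- def validate_constraints(
--     selected: list[int],
--     total_length: int,
--     min_selections: int,
--     min_consecutive_periods: int,
--     max_gap_between_periods: int,
--     max_gap_from_start: int,
-- ) -> tuple[bool, list[str]]:
--     if not selected:
--         return False, ["Selection is empty"]
--
--     # Boundary detection by set membership (no scan of the sorted list):
--     # x starts a run iff x-1 is absent, x ends a run iff x+1 is absent.
--     present = set(selected)
--     starts = sorted(x for x in present if x - 1 not in present)
--     ends = sorted(x for x in present if x + 1 not in present)
--
--     violations = []
--     if len(selected) < min_selections:
--         violations.append(f"Not enough selections: {len(selected)} < {min_selections}")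
--     if starts[0] > max_gap_from_start:
--         violations.append(f"Gap from start too large: {starts[0]} > {max_gap_from_start}")
--     end_gap = total_length - 1 - ends[-1]
--     if end_gap > max_gap_between_periods:
--         violations.append(f"Gap at end too large: {end_gap} > {max_gap_between_periods}")
--
--     # The k-th run is (starts[k], ends[k]); gaps sit between ends[k] and starts[k+1].
--     violations += [
--         f"Gap too large between indices {e} and {s}: "
--         f"{s - e - 1} > {max_gap_between_periods}"
--         for e, s in zip(ends, starts[1:])
--         if s - e - 1 > max_gap_between_periods
--     ]
--     violations += [
--         f"Consecutive run [{s}-{e}] too short: "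
--         f"length={e - s + 1} < {min_consecutive_periods}"
--         for s, e in zip(starts, ends)
--         if e - s + 1 < min_consecutive_periods
--     ]
--     return not violations, violations
-- ===== Notes on version B (the rewrite author's own statement) =====
-- stated objective: alternative
-- what changed: B finds run boundaries by set membership (x starts a run iff x-1 is absent, ends one iff x+1 is absent) and pairs the two sorted boundary lists, instead of A's stateful scan over the sorted list that grows runs and gap messages together; Pre_ excludes lists with duplicate values, where A's sorted scan splits a run at each duplicate (fragmented runs, a '-1' gap check) while B reads the selection as a set -- both defensible on that unspecified corner.
import Mathlib
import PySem

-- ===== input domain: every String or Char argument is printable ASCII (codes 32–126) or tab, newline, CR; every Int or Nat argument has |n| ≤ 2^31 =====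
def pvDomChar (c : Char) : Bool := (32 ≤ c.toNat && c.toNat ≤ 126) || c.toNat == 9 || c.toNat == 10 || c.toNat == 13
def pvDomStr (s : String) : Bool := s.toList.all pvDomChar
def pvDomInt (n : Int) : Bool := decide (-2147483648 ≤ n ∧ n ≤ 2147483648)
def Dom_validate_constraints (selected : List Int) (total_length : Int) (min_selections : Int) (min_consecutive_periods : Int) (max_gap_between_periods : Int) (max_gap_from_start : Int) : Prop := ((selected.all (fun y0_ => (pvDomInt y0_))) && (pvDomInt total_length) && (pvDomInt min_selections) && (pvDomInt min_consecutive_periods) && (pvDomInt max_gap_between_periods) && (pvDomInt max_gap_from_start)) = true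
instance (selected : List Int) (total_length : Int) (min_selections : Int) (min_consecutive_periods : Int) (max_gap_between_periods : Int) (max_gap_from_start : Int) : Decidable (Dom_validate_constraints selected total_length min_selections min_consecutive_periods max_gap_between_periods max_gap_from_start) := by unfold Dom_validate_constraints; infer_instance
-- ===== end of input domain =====

-- B detects run boundaries by set membership (x-1 / x+1 absent from the set) and pairs the two
-- sorted boundary lists, instead of A's stateful scan over the sorted list (alternative, same cost).

-- Message builders shared by both ports (both Pythons use the same f-strings).
def msgNotEnough (n m : Int) : String :=
  "Not enough selections: " ++ PySem.Int.toStr n ++ " < " ++ PySem.Int.toStr m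
def msgStart (i m : Int) : String :=
  "Gap from start too large: " ++ PySem.Int.toStr i ++ " > " ++ PySem.Int.toStr m
def msgEnd (g m : Int) : String :=
  "Gap at end too large: " ++ PySem.Int.toStr g ++ " > " ++ PySem.Int.toStr m
def msgGap (p n g m : Int) : String :=
  "Gap too large between indices " ++ PySem.Int.toStr p ++ " and " ++ PySem.Int.toStr n ++ ": "
    ++ PySem.Int.toStr g ++ " > " ++ PySem.Int.toStr m
def msgRun (s e l m : Int) : String :=
  "Consecutive run [" ++ PySem.Int.toStr s ++ "-" ++ PySem.Int.toStr e ++ "] too short: length="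
    ++ PySem.Int.toStr l ++ " < " ++ PySem.Int.toStr m

-- ===== PORT A =====
-- A's interleaved loop over range(1, len(indices)): state = (runs, run_start, violations),
-- here as structural recursion over the tail of the sorted list with prev = indices[i-1].
def aLoop (maxg : Int) : List Int → Int → Int → List (Int × Int) → List String →
    (List (Int × Int) × List String)
  | [], prev, run_start, runs, viol => (runs ++ [(run_start, prev)], viol)
  | x :: rest, prev, run_start, runs, viol =>
    if x ≠ prev + 1 then
      aLoop maxg rest x x (runs ++ [(run_start, prev)])
        (if x - prev - 1 > maxg then viol ++ [msgGap prev x (x - prev - 1) maxg] else viol)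
    else
      aLoop maxg rest x run_start runs viol

-- A's final 'for start, end in runs' loop appending run-length violations.
def aLenLoop (minc : Int) : List (Int × Int) → List String → List String
  | [], viol => viol
  | (s, e) :: rest, viol =>
    aLenLoop minc rest
      (if e - s + 1 < minc then viol ++ [msgRun s e (e - s + 1) minc] else viol)

def validate_constraints (selected : List Int) (total_length : Int) (min_selections : Int) (min_consecutive_periods : Int) (max_gap_between_periods : Int) (max_gap_from_start : Int) : Bool × List String :=
  -- 'if not selected' ≡ sorted(selected) = [] (sorting preserves emptiness)
  match PySem.List.sorted selected (fun x => x) false with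
  | [] => (false, ["Selection is empty"])
  | first :: rest =>
    let v1 := if ((first :: rest).length : Int) < min_selections then
        [msgNotEnough ((first :: rest).length : Int) min_selections] else []
    let v2 := if first > max_gap_from_start then v1 ++ [msgStart first max_gap_from_start] else v1
    let end_gap := total_length - 1 - rest.getLastD first    -- indices[-1]
    let v3 := if end_gap > max_gap_between_periods then
        v2 ++ [msgEnd end_gap max_gap_between_periods] else v2
    let p := aLoop max_gap_between_periods rest first first [] v3
    let v5 := aLenLoop min_consecutive_periods p.1 p.2
    (v5.length == 0, v5)

-- ===== PORT B =====
def validate_constraints_alt (selected : List Int) (total_length : Int) (min_selections : Int) (min_consecutive_periods : Int) (max_gap_between_periods : Int) (max_gap_from_start : Int) : Bool × List String :=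
  if selected.isEmpty then (false, ["Selection is empty"]) else
  let present := PySem.Set.ofList selected
  let starts := PySem.List.sorted (present.filter (fun x => !(PySem.Set.contains present (x - 1)))) (fun x => x) false
  let ends := PySem.List.sorted (present.filter (fun x => !(PySem.Set.contains present (x + 1)))) (fun x => x) false
  let v1 := if (selected.length : Int) < min_selections then
      [msgNotEnough (selected.length : Int) min_selections] else []
  let first := PySem.List.pyGetD starts 0 0          -- starts[0]; starts ≠ [] since selected ≠ []
  let v2 := if first > max_gap_from_start then v1 ++ [msgStart first max_gap_from_start] else v1
  let last := PySem.List.pyGetD ends (-1) 0          -- ends[-1]; ends ≠ []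
  let end_gap := total_length - 1 - last
  let v3 := if end_gap > max_gap_between_periods then
      v2 ++ [msgEnd end_gap max_gap_between_periods] else v2
  let v := v3
    ++ (ends.zip starts.tail).flatMap (fun p =>
        if p.2 - p.1 - 1 > max_gap_between_periods then
          [msgGap p.1 p.2 (p.2 - p.1 - 1) max_gap_between_periods] else [])
    ++ (starts.zip ends).flatMap (fun p =>
        if p.2 - p.1 + 1 < min_consecutive_periods then
          [msgRun p.1 p.2 (p.2 - p.1 + 1) min_consecutive_periods] else [])
  (v.isEmpty, v)

-- ===== PRECONDITION & SPEC =====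
-- Pre_ excludes lists with duplicate values: there A's sorted scan splits a consecutive run at each
-- duplicate (fragmented runs and a '-1' gap check), while B reads the selection as a set — both
-- defensible readings of an unspecified duplicate corner.
def Pre_validate_constraints (selected : List Int) (total_length : Int) (min_selections : Int) (min_consecutive_periods : Int) (max_gap_between_periods : Int) (max_gap_from_start : Int) : Prop := selected.Nodup
instance (selected : List Int) (total_length : Int) (min_selections : Int) (min_consecutive_periods : Int) (max_gap_between_periods : Int) (max_gap_from_start : Int) : Decidable (Pre_validate_constraints selected total_length min_selections min_consecutive_periods max_gap_between_periods max_gap_from_start) := by unfold Pre_validate_constraints; infer_instance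

def pvWitness_validate_constraints : List Int × Int × Int × Int × Int × Int := ([0, 1, 3], 5, 2, 1, 2, 1)

def Spec_validate_constraints (selected : List Int) (total_length : Int) (min_selections : Int) (min_consecutive_periods : Int) (max_gap_between_periods : Int) (max_gap_from_start : Int) (out : Bool × List String) : Prop := out = validate_constraints_alt selected total_length min_selections min_consecutive_periods max_gap_between_periods max_gap_from_start
instance (selected : List Int) (total_length : Int) (min_selections : Int) (min_consecutive_periods : Int) (max_gap_between_periods : Int) (max_gap_from_start : Int) (out : Bool × List String) : Decidable (Spec_validate_constraints selected total_length min_selections min_consecutive_periods max_gap_between_periods max_gap_from_start out) := by unfold Spec_validate_constraints; infer_instance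

-- ===== CLAIM (what is proved, stated in full; the proofs are below) =====
def Claim_equal_validate_constraints : Prop := ∀ (selected : List Int) (total_length : Int) (min_selections : Int) (min_consecutive_periods : Int) (max_gap_between_periods : Int) (max_gap_from_start : Int), Dom_validate_constraints selected total_length min_selections min_consecutive_periods max_gap_between_periods max_gap_from_start → Pre_validate_constraints selected total_length min_selections min_consecutive_periods max_gap_between_periods max_gap_from_start → Spec_validate_constraints selected total_length min_selections min_consecutive_periods max_gap_between_periods max_gap_from_start (validate_constraints selected total_length min_selections min_consecutive_periods max_gap_between_periods max_gap_from_start)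

-- ===== LEMMAS AND PROOFS =====

-- Proof-side reference: the grouping of a strictly increasing list f :: r into runs.
def runsOf : List Int → Int → Int → List (Int × Int)
  | [], start, prev => [(start, prev)]
  | x :: rest, start, prev =>
    if x ≠ prev + 1 then (start, prev) :: runsOf rest x x
    else runsOf rest start x

-- Run starts after the head / run ends, read off the successor structure.
def breaksOf : Int → List Int → List Int
  | _, [] => []
  | p, x :: r => if x = p + 1 then breaksOf x r else x :: breaksOf x r

def endsOf : Int → List Int → List Int
  | p, [] => [p]
  | p, x :: r => if x = p + 1 then endsOf x r else p :: endsOf x r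

def gapsOf (maxg : Int) (runs : List (Int × Int)) : List String :=
  (runs.zip runs.tail).flatMap (fun pr =>
    if pr.2.1 - pr.1.2 - 1 > maxg then [msgGap pr.1.2 pr.2.1 (pr.2.1 - pr.1.2 - 1) maxg] else [])

def lensOf (minc : Int) (runs : List (Int × Int)) : List String :=
  runs.flatMap (fun se =>
    if se.2 - se.1 + 1 < minc then [msgRun se.1 se.2 (se.2 - se.1 + 1) minc] else [])

lemma runsOf_head : ∀ (rest : List Int) (s p : Int), ∃ e t, runsOf rest s p = (s, e) :: t := by
  intro rest
  induction rest with
  | nil => intro s p; exact ⟨p, [], rfl⟩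
  | cons x r ih =>
    intro s p
    by_cases hx : x = p + 1
    · simpa [runsOf, hx] using ih s x
    · exact ⟨p, runsOf r x x, by simp [runsOf, hx]⟩

lemma gapsOf_cons2 (maxg : Int) (a b : Int × Int) (t : List (Int × Int)) :
    gapsOf maxg (a :: b :: t) =
      (if b.1 - a.2 - 1 > maxg then [msgGap a.2 b.1 (b.1 - a.2 - 1) maxg] else [])
        ++ gapsOf maxg (b :: t) := by
  simp [gapsOf]

-- A's interleaved loop = (the run table, prior violations ++ the gap messages of that table).
lemma aLoop_eq (maxg : Int) : ∀ (rest : List Int) (prev rs : Int) (runs : List (Int × Int))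
    (viol : List String),
    aLoop maxg rest prev rs runs viol =
      (runs ++ runsOf rest rs prev, viol ++ gapsOf maxg (runsOf rest rs prev)) := by
  intro rest
  induction rest with
  | nil => intro prev rs runs viol; simp [aLoop, runsOf, gapsOf]
  | cons x r ih =>
    intro prev rs runs viol
    by_cases hx : x = prev + 1
    · subst hx
      simp only [aLoop, runsOf, ne_eq, not_true_eq_false, ite_false]
      exact ih _ rs runs viol
    · obtain ⟨e, t, hb⟩ := runsOf_head r x x
      simp only [aLoop, runsOf, ne_eq, hx, not_false_eq_true, if_pos]
      rw [ih x x (runs ++ [(rs, prev)])]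
      rw [hb, gapsOf_cons2, ← hb]
      simp only [Prod.mk.injEq]
      refine ⟨by simp, ?_⟩
      split_ifs <;> simp

-- A's run-length loop = prior violations ++ the run-length messages of the table.
lemma aLenLoop_eq (minc : Int) : ∀ (runs : List (Int × Int)) (viol : List String),
    aLenLoop minc runs viol = viol ++ lensOf minc runs := by
  intro runs
  induction runs with
  | nil => intro viol; simp [aLenLoop, lensOf]
  | cons se r ih =>
    intro viol
    obtain ⟨s, e⟩ := se
    simp only [aLenLoop]
    rw [ih]
    simp only [lensOf, List.flatMap_cons]
    split_ifs <;> simp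

lemma length_beq_isEmpty (l : List String) : (l.length == 0) = l.isEmpty := by
  cases l <;> rfl

-- The run table projected on starts / ends.
lemma runsOf_map_fst : ∀ (r : List Int) (s p : Int),
    (runsOf r s p).map Prod.fst = s :: breaksOf p r := by
  intro r
  induction r with
  | nil => intro s p; simp [runsOf, breaksOf]
  | cons x r' ih =>
    intro s p
    by_cases hx : x = p + 1 <;> simp [runsOf, breaksOf, hx, ih]

lemma runsOf_map_snd : ∀ (r : List Int) (s p : Int),
    (runsOf r s p).map Prod.snd = endsOf p r := by
  intro r
  induction r with
  | nil => intro s p; simp [runsOf, endsOf]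
  | cons x r' ih =>
    intro s p
    by_cases hx : x = p + 1 <;> simp [runsOf, endsOf, hx, ih]

lemma endsOf_ne_nil : ∀ (r : List Int) (p : Int), endsOf p r ≠ [] := by
  intro r
  induction r with
  | nil => intro p; simp [endsOf]
  | cons x r' ih =>
    intro p
    by_cases hx : x = p + 1 <;> simp [endsOf, hx, ih]

lemma endsOf_getLastD : ∀ (r : List Int) (p d : Int),
    (endsOf p r).getLastD d = r.getLastD p := by
  intro r
  induction r with
  | nil => intro p d; simp [endsOf]
  | cons x r' ih =>
    intro p d
    rw [List.getLastD_cons]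
    by_cases hx : x = p + 1
    · simp only [endsOf, if_pos hx]
      rw [ih, hx]
    · simp only [endsOf, if_neg hx]
      rw [← ih x d]
      rcases hn : endsOf x r' with _ | ⟨y, t⟩
      · exact absurd hn (endsOf_ne_nil r' x)
      · simp

-- x-1 ∈ u localises to the immediate predecessor, for u strictly increasing.
lemma mem_pred_iff (u : List Int) (hch : u.Pairwise (· < ·)) (pre : List Int) (p x : Int)
    (r : List Int) (hu : u = pre ++ p :: x :: r) : ((x - 1) ∈ u ↔ x = p + 1) := by
  subst hu
  rw [List.pairwise_append] at hch
  obtain ⟨-, hcons, hcross⟩ := hch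
  rw [List.pairwise_cons] at hcons
  obtain ⟨hp, hcons2⟩ := hcons
  rw [List.pairwise_cons] at hcons2
  obtain ⟨hx, -⟩ := hcons2
  have hpx : p < x := hp x (by simp)
  constructor
  · intro hm
    rcases List.mem_append.1 hm with hm | hm
    · have := hcross _ hm p (by simp)
      omega
    · rcases List.mem_cons.1 hm with hm | hm
      · omega
      · rcases List.mem_cons.1 hm with hm | hm
        · omega
        · have := hx _ hm
          omega
  · intro h
    subst h
    have hxe : p + 1 - 1 = p := by omega
    rw [hxe]
    simp

lemma mem_succ_iff (u : List Int) (hch : u.Pairwise (· < ·)) (pre : List Int) (p x : Int)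
    (r : List Int) (hu : u = pre ++ p :: x :: r) : ((p + 1) ∈ u ↔ x = p + 1) := by
  subst hu
  rw [List.pairwise_append] at hch
  obtain ⟨-, hcons, hcross⟩ := hch
  rw [List.pairwise_cons] at hcons
  obtain ⟨hp, hcons2⟩ := hcons
  rw [List.pairwise_cons] at hcons2
  obtain ⟨hx, -⟩ := hcons2
  have hpx : p < x := hp x (by simp)
  constructor
  · intro hm
    rcases List.mem_append.1 hm with hm | hm
    · have := hcross _ hm p (by simp)
      omega
    · rcases List.mem_cons.1 hm with hm | hm
      · omega
      · rcases List.mem_cons.1 hm with hm | hm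
        · omega
        · have := hx _ hm
          omega
  · intro h
    subst h
    simp

lemma filter_breaks (u : List Int) (hch : u.Pairwise (· < ·)) :
    ∀ (r : List Int) (pre : List Int) (p : Int), u = pre ++ p :: r →
      r.filter (fun x => !((x - 1) ∈ u : Bool)) = breaksOf p r := by
  intro r
  induction r with
  | nil => intro pre p _; rfl
  | cons x r' ih =>
    intro pre p hu
    have hmem := mem_pred_iff u hch pre p x r' hu
    have ih' := ih (pre ++ [p]) x (by simpa using hu)
    by_cases hx : x = p + 1
    · have hd : (!((x - 1) ∈ u : Bool)) = false := by simp [hmem.mpr hx]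
      rw [List.filter_cons]
      simp only [hd, Bool.false_eq_true, if_false]
      rw [ih']
      simp [breaksOf, hx]
    · have hd : (!((x - 1) ∈ u : Bool)) = true := by simp [hmem, hx]
      rw [List.filter_cons]
      simp only [hd, if_true]
      rw [ih']
      simp [breaksOf, hx]

lemma filter_ends (u : List Int) (hch : u.Pairwise (· < ·)) :
    ∀ (r : List Int) (pre : List Int) (p : Int), u = pre ++ p :: r →
      (p :: r).filter (fun x => !((x + 1) ∈ u : Bool)) = endsOf p r := by
  intro r
  induction r with
  | nil =>
    intro pre p hu
    have hnm : (p + 1) ∉ u := by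
      intro hm
      subst hu
      rw [List.pairwise_append] at hch
      obtain ⟨-, -, hcross⟩ := hch
      rcases List.mem_append.1 hm with hm | hm
      · have := hcross _ hm p (by simp)
        omega
      · simp at hm
    have hd : (!((p + 1) ∈ u : Bool)) = true := by simp [hnm]
    rw [List.filter_cons]
    simp only [hd, if_true]
    rfl
  | cons x r' ih =>
    intro pre p hu
    have hmem := mem_succ_iff u hch pre p x r' hu
    have ih' := ih (pre ++ [p]) x (by simpa using hu)
    by_cases hx : x = p + 1
    · have hd : (!((p + 1) ∈ u : Bool)) = false := by simp [hmem.mpr hx]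
      rw [List.filter_cons]
      simp only [hd, Bool.false_eq_true, if_false]
      rw [ih']
      simp [endsOf, hx]
    · have hd : (!((p + 1) ∈ u : Bool)) = true := by simp [hmem, hx]
      rw [List.filter_cons]
      simp only [hd, if_true]
      rw [ih']
      simp [endsOf, hx]

-- zip of the two boundary lists recovers the run table and its adjacent pairs.
lemma zip_map_fst_snd {α β : Type} (l : List (α × β)) :
    (l.map Prod.fst).zip (l.map Prod.snd) = l := by
  induction l with
  | nil => rfl
  | cons a t ih => simp [ih]

lemma zip_snd_fst_tail {α β : Type} : ∀ (l : List (α × β)),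
    (l.map Prod.snd).zip ((l.map Prod.fst).tail) =
      (l.zip l.tail).map (fun p => (p.1.2, p.2.1)) := by
  intro l
  induction l with
  | nil => rfl
  | cons a t ih =>
    cases t with
    | nil => rfl
    | cons b t' => simpa using ih

-- ===== VERDICT (by name: the statement is the Claim_ definition above) =====
theorem validate_constraints_spec : Claim_equal_validate_constraints := by
  intro selected total_length min_selections min_consecutive_periods max_gap_between_periods
    max_gap_from_start _ hnd
  replace hnd : selected.Nodup := hnd
  unfold Spec_validate_constraints validate_constraints validate_constraints_alt
  have hofl : PySem.Set.ofList selected = selected := PySem.Set.ofList_eq_self_of_nodup selected hnd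
  cases hs : PySem.List.sorted selected (fun x => x) false with
  | nil =>
    have h0 : selected = [] := (PySem.List.sorted_eq_nil_iff selected (fun x => x) false).1 hs
    simp [h0]
  | cons first rest =>
    have hperm : (PySem.List.sorted selected (fun x => x) false).Perm selected :=
      PySem.List.sorted_perm selected _ false
    have hne : ¬ selected.isEmpty := by
      intro h
      rw [List.isEmpty_iff] at h
      have h2 := (PySem.List.sorted_eq_nil_iff selected (fun x => x) false).2 h
      rw [hs] at h2
      exact absurd h2 (List.cons_ne_nil _ _)
    have hndu : (first :: rest).Nodup := hs ▸ (hperm.nodup_iff.mpr hnd)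
    have hle : (first :: rest).Pairwise (fun a b => a ≤ b) := by
      have h3 := PySem.List.sorted_pairwise selected (fun x => x)
      rwa [hs] at h3
    have hch : (first :: rest).Pairwise (· < ·) :=
      (hle.and hndu).imp (fun h => lt_of_le_of_ne h.1 h.2)
    have hmemiff : ∀ y : Int, PySem.Set.contains selected y = ((y ∈ (first :: rest)) : Bool) := by
      intro y
      rw [PySem.Set.contains_eq_listContains]
      by_cases hy : y ∈ selected
      · have hy2 : y ∈ (first :: rest) := by
          rw [← hs]
          exact hperm.mem_iff.mpr hy
        simp [hy, hy2]
      · have hy2 : y ∉ (first :: rest) := by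
          intro c
          rw [← hs] at c
          exact hy (hperm.mem_iff.mp c)
        simp [hy, hy2]
    have hsf : ∀ (q : Int → Bool),
        PySem.List.sorted (selected.filter q) (fun x => x) false = (first :: rest).filter q := by
      intro q
      apply PySem.List.sorted_eq_of_perm_of_pairwise_lt
      · have h4 := hperm.filter q
        rw [hs] at h4
        exact h4
      · exact hch.sublist List.filter_sublist
    have hcont1 : (fun x => !(PySem.Set.contains selected (x - 1)))
        = (fun x => !((x - 1) ∈ (first :: rest) : Bool)) := by
      funext x
      rw [hmemiff]
    have hcont2 : (fun x => !(PySem.Set.contains selected (x + 1)))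
        = (fun x => !((x + 1) ∈ (first :: rest) : Bool)) := by
      funext x
      rw [hmemiff]
    have hheadmem : (first - 1) ∉ (first :: rest) := by
      intro hm
      rcases List.mem_cons.1 hm with hm | hm
      · omega
      · have := (List.pairwise_cons.1 hch).1 _ hm
        omega
    have hstarts : PySem.List.sorted
          (selected.filter (fun x => !(PySem.Set.contains selected (x - 1)))) (fun x => x) false
        = first :: breaksOf first rest := by
      rw [hcont1, hsf, List.filter_cons, if_pos (by simp [hheadmem]),
        filter_breaks (first :: rest) hch rest [] first rfl]
    have hends : PySem.List.sorted
          (selected.filter (fun x => !(PySem.Set.contains selected (x + 1)))) (fun x => x) false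
        = endsOf first rest := by
      rw [hcont2, hsf, filter_ends (first :: rest) hch rest [] first rfl]
    have hlen : selected.length = (first :: rest).length := by
      rw [← hs]
      exact hperm.length_eq.symm
    have hfst := runsOf_map_fst rest first first
    have hsnd := runsOf_map_snd rest first first
    have hnn := endsOf_ne_nil rest first
    have hb0 : PySem.List.pyGetD ((runsOf rest first first).map Prod.fst) 0 0 = first := by
      rw [hfst]
      exact PySem.List.pyGetD_zero_cons _ _ _
    have hbl : PySem.List.pyGetD ((runsOf rest first first).map Prod.snd) (-1) 0
        = rest.getLastD first := by
      rw [hsnd, PySem.List.pyGetD_neg_one (endsOf first rest) 0 hnn]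
      have h5 : (endsOf first rest).getLast hnn = (endsOf first rest).getLastD 0 := by
        rw [List.getLastD_eq_getLast?, List.getLast?_eq_getLast hnn]
        rfl
      rw [h5, endsOf_getLastD]
    simp only [if_neg hne, hofl]
    rw [hstarts, hends, ← hfst, ← hsnd]
    rw [aLoop_eq, aLenLoop_eq]
    simp only [List.nil_append]
    rw [hb0, hbl, hlen]
    rw [zip_snd_fst_tail, List.flatMap_map, zip_map_fst_snd]
    rw [length_beq_isEmpty]
    simp only [List.append_assoc]
    rfl
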